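-- pv_equiv track=rewrite | github.com/wiwitrifai/competitive-programming | codeforces/400/g.py | solve
-- ===== SOURCE A (Python) =====
-- def decode(c):
--     if ord(c) <= ord('9') and ord(c) >= ord('0'):
--         return ord(c) - ord('0')
--     return ord(c) - ord('a') + 10
--
-- dp = [[[0, 0] for j in range(2)]for i in range(20)]
--
-- def solve(s, full):
--     n = len(s)
--     ans = 0
--     for d_max in range(16):
--         for i in range(n+1):
--             for j in range(2):
--                 for k in range(2):
--                     dp[i][j][k] = 0
--         dp[0][1][0] = 1
--         pos = n-1- (d_max // 4)
--         bit = 1<<(d_max % 4)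
--         if pos < 0: continue
--         for i in range(n):
--             for up in range(2):
--                 for fill in range(2):
--                     if dp[i][up][fill] == 0: continue
--                     digm = min(d_max, decode(s[i]) if up > 0 else d_max)
--                     for d in range(digm+1):
--                         if (i == pos) and ((d & bit) == 0):
--                             continue
--                         tup = up
--                         if d != decode(s[i]): tup = 0
--                         tfill = fill
--                         if d == d_max: tfill = 1
--                         dp[i+1][tup][tfill] += dp[i][up][fill]
--         for i in range(full+1):
--             ans += dp[n][i][1]
--     return ans
-- ===== SOURCE B (Python) =====
-- def decode(c):
--     if ord(c) <= ord('9') and ord(c) >= ord('0'):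
--         return ord(c) - ord('0')
--     return ord(c) - ord('a') + 10
--
-- def solve(s, full):
--     n = len(s)
--     ans = 0
--     for d_max in range(16):
--         pos = n - 1 - d_max // 4
--         bit = 1 << (d_max % 4)
--         if pos < 0:
--             continue
--
--         def cell(i, g, up, fill):
--             digm = min(d_max, decode(s[i]) if up > 0 else d_max)
--             t = 0
--             for d in range(digm + 1):
--                 if i == pos and (d & bit) == 0:
--                     continue
--                 t += g[up if d == decode(s[i]) else 0][1 if d == d_max else fill]
--             return t
--
--         def go(i):
--             if i >= n:
--                 return [[0, 1 if full >= 0 else 0], [0, 1 if full >= 1 else 0]]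
--             g = go(i + 1)
--             return [[cell(i, g, 0, 0), cell(i, g, 0, 1)],
--                     [cell(i, g, 1, 0), cell(i, g, 1, 1)]]
--
--         ans += go(0)[1][0]
--     return ans
-- ===== Notes on version B (the rewrite author's own statement) =====
-- stated objective: alternative
-- what changed: Replaces A's forward 20x2x2 dp table (reset per d_max, swept forward with a reachability skip, then read off by a scan over range(full+1)) with a backward recursion over suffix positions that carries a single 2x2 vector of completion counts and returns its (1,0) entry directly.
import Mathlib
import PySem

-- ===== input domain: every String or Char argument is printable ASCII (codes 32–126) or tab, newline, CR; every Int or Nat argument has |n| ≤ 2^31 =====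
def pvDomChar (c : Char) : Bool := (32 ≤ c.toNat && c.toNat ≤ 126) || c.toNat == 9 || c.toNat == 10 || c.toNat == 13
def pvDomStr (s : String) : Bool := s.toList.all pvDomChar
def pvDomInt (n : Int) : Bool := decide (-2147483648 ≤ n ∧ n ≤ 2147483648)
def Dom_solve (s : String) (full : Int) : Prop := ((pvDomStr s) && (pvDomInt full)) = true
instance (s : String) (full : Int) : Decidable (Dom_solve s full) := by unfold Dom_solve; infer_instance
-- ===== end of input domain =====

-- B replaces A's forward 20×2×2 dp table (reset and swept per d_max, then read off by a final
-- scan over range(full+1)) with a backward recursion over suffixes carrying a single 2×2 vector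
-- of completion counts; objective: alternative decomposition (no speed claim).

-- ===== PORT A =====
-- decode(c) from the module (shared source helper; used by both ports)
def pydecode (c : Char) : Int :=
  if (c.toNat : Int) ≤ ('9'.toNat : Int) ∧ (c.toNat : Int) ≥ ('0'.toNat : Int) then
    (c.toNat : Int) - ('0'.toNat : Int)
  else (c.toNat : Int) - ('a'.toNat : Int) + 10

-- the global 20×2×2 dp list is modelled as a finite map (row, up, fill) ↦ value, default 0;
-- inside Pre_ every Python access is in range, so the representation is exact
def dpGet (dp : PySem.Dict (Int × Int × Int) Int) (i j k : Int) : Int := dp.getD (i, j, k) 0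

-- dp[r][tup][tfill] += v
def aUpd (dp : PySem.Dict (Int × Int × Int) Int) (r tup tfill v : Int) :
    PySem.Dict (Int × Int × Int) Int :=
  dp.modify (r, tup, tfill) 0 (· + v)

-- body of A's (up, fill) iteration: the 'if dp[i][up][fill] == 0: continue' guard and
-- the innermost 'for d in range(digm+1)' loop
def aCell (cs : List Char) (d_max pos bit i up fill : Int)
    (dp : PySem.Dict (Int × Int × Int) Int) : PySem.Dict (Int × Int × Int) Int :=
  if dpGet dp i up fill = 0 then dp
  else
    let digm := min d_max (if up > 0 then pydecode (cs.getD i.toNat ' ') else d_max)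
    (PySem.List.pyRange 0 (digm + 1) 1).foldl (fun dp d =>
      if i = pos ∧ PySem.Int.band d bit = 0 then dp
      else aUpd dp (i + 1) (if d ≠ pydecode (cs.getD i.toNat ' ') then 0 else up)
             (if d = d_max then 1 else fill) (dpGet dp i up fill)) dp

-- A's 'for up in range(2): for fill in range(2):' over one row i
def aRow (cs : List Char) (d_max pos bit : Int) (dp : PySem.Dict (Int × Int × Int) Int)
    (i : Int) : PySem.Dict (Int × Int × Int) Int :=
  (PySem.List.pyRange 0 2 1).foldl (fun dp up =>
    (PySem.List.pyRange 0 2 1).foldl (fun dp fill => aCell cs d_max pos bit i up fill dp) dp) dp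

-- the table after the reset loops and 'dp[0][1][0] = 1'
def dpZero : PySem.Dict (Int × Int × Int) Int := PySem.Dict.empty.insert (0, 1, 0) 1

def solve (s : String) (full : Int) : Int :=
  (PySem.List.pyRange 0 16 1).foldl (fun ans d_max =>
    let pos : Int := (s.toList.length : Int) - 1 - PySem.Int.floordiv d_max 4
    let bit : Int := 1 <<< (PySem.Int.mod d_max 4).toNat
    if pos < 0 then ans
    else
      let dp := (PySem.List.pyRange 0 (s.toList.length : Int) 1).foldl
        (aRow s.toList d_max pos bit) dpZero
      ans + (PySem.List.pyRange 0 (full + 1) 1).foldl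
        (fun a i => a + dpGet dp (s.toList.length : Int) i 1) 0) 0

-- ===== PORT B =====
-- g[u][f] lookup on the 2×2 suffix vector
def gidx (g : (Int × Int) × (Int × Int)) (u f : Int) : Int :=
  if u = 0 then (if f = 0 then g.1.1 else g.1.2) else (if f = 0 then g.2.1 else g.2.2)

-- B's cell(i, g, up, fill); c is the character s[i]
def bCell (d_max pos bit i : Int) (c : Char)
    (g : (Int × Int) × (Int × Int)) (up fill : Int) : Int :=
  let digm := min d_max (if up > 0 then pydecode c else d_max)
  (PySem.List.pyRange 0 (digm + 1) 1).foldl (fun t d =>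
    if i = pos ∧ PySem.Int.band d bit = 0 then t
    else t + gidx g (if d = pydecode c then up else 0)
               (if d = d_max then 1 else fill)) 0

-- B's go(i): the 2×2 vector of completion counts for positions i..n-1; the recursion on the
-- index i is realised structurally on the remaining suffix s[i:]
def bGo (full d_max pos bit : Int) : Int → List Char → (Int × Int) × (Int × Int)
  | _, [] => ((0, if full ≥ 0 then 1 else 0), (0, if full ≥ 1 then 1 else 0))
  | i, c :: rest =>
    let g := bGo full d_max pos bit (i + 1) rest
    ((bCell d_max pos bit i c g 0 0, bCell d_max pos bit i c g 0 1),
     (bCell d_max pos bit i c g 1 0, bCell d_max pos bit i c g 1 1))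

def solve_alt (s : String) (full : Int) : Int :=
  (PySem.List.pyRange 0 16 1).foldl (fun ans d_max =>
    let pos : Int := (s.toList.length : Int) - 1 - PySem.Int.floordiv d_max 4
    let bit : Int := 1 <<< (PySem.Int.mod d_max 4).toNat
    if pos < 0 then ans
    else ans + (bGo full d_max pos bit 0 s.toList).2.1) 0

-- ===== PRECONDITION & SPEC =====
-- Pre_ excludes exactly the inputs on which A raises IndexError: strings longer than the
-- global 20-row dp table, and full ≥ 2 with a nonempty string (the final read dp[n][i][1]
-- runs i up to full over a length-2 list).
def Pre_solve (s : String) (full : Int) : Prop :=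
  s.toList.length ≤ 19 ∧ (s.toList.length = 0 ∨ full ≤ 1)
instance (s : String) (full : Int) : Decidable (Pre_solve s full) := by
  unfold Pre_solve; infer_instance
def pvWitness_solve : String × Int := ("ff", 1)

def Spec_solve (s : String) (full : Int) (out : Int) : Prop := out = solve_alt s full
instance (s : String) (full : Int) (out : Int) : Decidable (Spec_solve s full out) := by
  unfold Spec_solve; infer_instance

-- ===== CLAIM (what is proved, stated in full; the proofs are below) =====
def Claim_equal_solve : Prop := ∀ (s : String) (full : Int),
  Dom_solve s full → Pre_solve s full → Spec_solve s full (solve s full)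

-- ===== LEMMAS AND PROOFS =====
-- weighted sum of row r of the table against a suffix vector g
def Wrow (g : (Int × Int) × (Int × Int)) (dp : PySem.Dict (Int × Int × Int) Int) (r : Int) : Int :=
  dpGet dp r 0 0 * gidx g 0 0 + dpGet dp r 0 1 * gidx g 0 1
    + dpGet dp r 1 0 * gidx g 1 0 + dpGet dp r 1 1 * gidx g 1 1

-- A's table after processing rows 0..m-1
def dpA (cs : List Char) (d_max pos bit : Int) (m : Nat) : PySem.Dict (Int × Int × Int) Int :=
  (PySem.List.pyRange 0 (m : Int) 1).foldl (aRow cs d_max pos bit) dpZero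

theorem dget_aUpd_ne (dp : PySem.Dict (Int × Int × Int) Int) (r a b v j u f : Int)
    (hj : j ≠ r) : dpGet (aUpd dp r a b v) j u f = dpGet dp j u f := by
  simp only [dpGet, aUpd, PySem.Dict.getD_modify]
  rw [if_neg (fun h => hj (congrArg Prod.fst h))]

theorem Wrow_aUpd (g : (Int × Int) × (Int × Int)) (dp : PySem.Dict (Int × Int × Int) Int)
    (r a b v : Int) (ha : a = 0 ∨ a = 1) (hb : b = 0 ∨ b = 1) :
    Wrow g (aUpd dp r a b v) r = Wrow g dp r + v * gidx g a b := by
  rcases ha with rfl | rfl <;> rcases hb with rfl | rfl <;>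
    simp [Wrow, aUpd, dpGet, PySem.Dict.getD_modify, Prod.mk.injEq] <;> ring

theorem pyRange2 : PySem.List.pyRange 0 2 1 = [0, 1] := by decide

-- A's innermost fold writes only into row i+1
theorem aCellFold_frame (d_max pos bit i up fill si : Int) (L : List Int)
    (dp : PySem.Dict (Int × Int × Int) Int) (j u f : Int) (hj : j ≠ i + 1) :
    dpGet (L.foldl (fun dp d =>
      if i = pos ∧ PySem.Int.band d bit = 0 then dp
      else aUpd dp (i + 1) (if d ≠ si then 0 else up)
             (if d = d_max then 1 else fill) (dpGet dp i up fill)) dp) j u f = dpGet dp j u f := by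
  induction L generalizing dp with
  | nil => rfl
  | cons d L ih =>
    simp only [List.foldl_cons]
    by_cases hc : i = pos ∧ PySem.Int.band d bit = 0
    · rw [if_pos hc]; exact ih dp
    · rw [if_neg hc, ih]
      exact dget_aUpd_ne _ _ _ _ _ _ _ _ hj

theorem aCell_frame (cs : List Char) (d_max pos bit i up fill : Int)
    (dp : PySem.Dict (Int × Int × Int) Int) (j u f : Int) (hj : j ≠ i + 1) :
    dpGet (aCell cs d_max pos bit i up fill dp) j u f = dpGet dp j u f := by
  unfold aCell
  split
  · rfl
  · exact aCellFold_frame d_max pos bit i up fill (pydecode (cs.getD i.toNat ' ')) _ dp j u f hj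

-- the contribution of one admitted digit d
def hFun (d_max pos bit i up fill si : Int) (g : (Int × Int) × (Int × Int)) (d : Int) : Int :=
  if i = pos ∧ PySem.Int.band d bit = 0 then 0
  else gidx g (if d ≠ si then 0 else up) (if d = d_max then 1 else fill)

theorem bCell_sum (d_max pos bit i : Int) (c : Char) (g : (Int × Int) × (Int × Int))
    (up fill : Int) :
    bCell d_max pos bit i c g up fill =
      ((PySem.List.pyRange 0 (min d_max (if up > 0 then pydecode c else d_max) + 1) 1).map
        (hFun d_max pos bit i up fill (pydecode c) g)).sum := by
  unfold bCell
  rw [PySem.List.foldl_congr_mem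
    (g := fun t d => t + hFun d_max pos bit i up fill (pydecode c) g d)
    (h := by
      intro acc d _
      simp only [hFun]
      by_cases hc : i = pos ∧ PySem.Int.band d bit = 0
      · rw [if_pos hc, if_pos hc, add_zero]
      · rw [if_neg hc, if_neg hc]
        congr 1
        by_cases hd : d = pydecode c <;> simp [hd])]
  rw [PySem.List.foldl_add]
  simp

theorem aCellFold_W (d_max pos bit i up fill si : Int) (g : (Int × Int) × (Int × Int))
    (hup : up = 0 ∨ up = 1) (hfill : fill = 0 ∨ fill = 1) (L : List Int)
    (dp : PySem.Dict (Int × Int × Int) Int) :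
    Wrow g (L.foldl (fun dp d =>
      if i = pos ∧ PySem.Int.band d bit = 0 then dp
      else aUpd dp (i + 1) (if d ≠ si then 0 else up)
             (if d = d_max then 1 else fill) (dpGet dp i up fill)) dp) (i + 1) =
      Wrow g dp (i + 1)
        + dpGet dp i up fill * ((L.map (hFun d_max pos bit i up fill si g)).sum) := by
  induction L generalizing dp with
  | nil => simp
  | cons d L ih =>
    simp only [List.foldl_cons, List.map_cons, List.sum_cons]
    by_cases hc : i = pos ∧ PySem.Int.band d bit = 0
    · rw [if_pos hc, ih, hFun, if_pos hc]
      ring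
    · rw [if_neg hc, ih]
      have hne : (i : Int) ≠ i + 1 := by omega
      have hframe : dpGet (aUpd dp (i + 1) (if d ≠ si then 0 else up)
          (if d = d_max then 1 else fill) (dpGet dp i up fill)) i up fill = dpGet dp i up fill :=
        dget_aUpd_ne _ _ _ _ _ _ _ _ hne
      rw [hframe]
      rw [Wrow_aUpd g dp (i + 1) _ _ _
        (by rcases hup with rfl | rfl <;> by_cases hd : d = si <;> simp [hd])
        (by rcases hfill with rfl | rfl <;> by_cases hd : d = d_max <;> simp [hd])]
      rw [hFun, if_neg hc]
      ring

theorem aCell_W (cs : List Char) (d_max pos bit i up fill : Int)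
    (dp : PySem.Dict (Int × Int × Int) Int) (g : (Int × Int) × (Int × Int))
    (hup : up = 0 ∨ up = 1) (hfill : fill = 0 ∨ fill = 1) :
    Wrow g (aCell cs d_max pos bit i up fill dp) (i + 1) =
      Wrow g dp (i + 1)
        + dpGet dp i up fill * bCell d_max pos bit i (cs.getD i.toNat ' ') g up fill := by
  rw [bCell_sum]
  unfold aCell
  split
  · rename_i h0
    rw [h0]
    ring
  · exact aCellFold_W d_max pos bit i up fill (pydecode (cs.getD i.toNat ' ')) g hup hfill _ dp

theorem aRow_eq (cs : List Char) (d_max pos bit i : Int)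
    (dp : PySem.Dict (Int × Int × Int) Int) :
    aRow cs d_max pos bit dp i =
      aCell cs d_max pos bit i 1 1 (aCell cs d_max pos bit i 1 0
        (aCell cs d_max pos bit i 0 1 (aCell cs d_max pos bit i 0 0 dp))) := by
  simp [aRow, pyRange2]

theorem aRow_frame (cs : List Char) (d_max pos bit i : Int)
    (dp : PySem.Dict (Int × Int × Int) Int) (j u f : Int) (hj : j ≠ i + 1) :
    dpGet (aRow cs d_max pos bit dp i) j u f = dpGet dp j u f := by
  rw [aRow_eq]
  rw [aCell_frame _ _ _ _ _ _ _ _ _ _ _ hj]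
  rw [aCell_frame _ _ _ _ _ _ _ _ _ _ _ hj]
  rw [aCell_frame _ _ _ _ _ _ _ _ _ _ _ hj]
  exact aCell_frame _ _ _ _ _ _ _ _ _ _ _ hj

theorem aRow_W (cs : List Char) (d_max pos bit i : Int)
    (dp : PySem.Dict (Int × Int × Int) Int) (g : (Int × Int) × (Int × Int)) :
    Wrow g (aRow cs d_max pos bit dp i) (i + 1) =
      Wrow g dp (i + 1)
      + dpGet dp i 0 0 * bCell d_max pos bit i (cs.getD i.toNat ' ') g 0 0
      + dpGet dp i 0 1 * bCell d_max pos bit i (cs.getD i.toNat ' ') g 0 1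
      + dpGet dp i 1 0 * bCell d_max pos bit i (cs.getD i.toNat ' ') g 1 0
      + dpGet dp i 1 1 * bCell d_max pos bit i (cs.getD i.toNat ' ') g 1 1 := by
  have hne : (i : Int) ≠ i + 1 := by omega
  set A0 := aCell cs d_max pos bit i 0 0 dp with hA0
  set A1 := aCell cs d_max pos bit i 0 1 A0 with hA1
  set A2 := aCell cs d_max pos bit i 1 0 A1 with hA2
  have f0 : ∀ u f : Int, dpGet A0 i u f = dpGet dp i u f := fun u f =>
    aCell_frame _ _ _ _ _ _ _ _ _ _ _ hne
  have f1 : ∀ u f : Int, dpGet A1 i u f = dpGet dp i u f := fun u f => by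
    rw [hA1, aCell_frame _ _ _ _ _ _ _ _ _ _ _ hne]; exact f0 u f
  have f2 : ∀ u f : Int, dpGet A2 i u f = dpGet dp i u f := fun u f => by
    rw [hA2, aCell_frame _ _ _ _ _ _ _ _ _ _ _ hne]; exact f1 u f
  rw [aRow_eq,
    aCell_W cs d_max pos bit i 1 1 A2 g (Or.inr rfl) (Or.inr rfl),
    aCell_W cs d_max pos bit i 1 0 A1 g (Or.inr rfl) (Or.inl rfl),
    aCell_W cs d_max pos bit i 0 1 A0 g (Or.inl rfl) (Or.inr rfl),
    aCell_W cs d_max pos bit i 0 0 dp g (Or.inl rfl) (Or.inl rfl),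
    f2 1 1, f1 1 0, f0 0 1]

theorem dpA_succ (cs : List Char) (d_max pos bit : Int) (m : Nat) :
    dpA cs d_max pos bit (m + 1) =
      aRow cs d_max pos bit (dpA cs d_max pos bit m) (m : Int) := by
  unfold dpA
  have : ((m + 1 : Nat) : Int) = (m : Int) + 1 := by push_cast; ring
  rw [this, PySem.List.pyRange_one_succ_right (by positivity : (0:Int) ≤ (m : Int)),
    List.foldl_append]
  rfl

theorem dpA_high (cs : List Char) (d_max pos bit : Int) (m : Nat) (j u f : Int)
    (hj : (m : Int) < j) : dpGet (dpA cs d_max pos bit m) j u f = 0 := by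
  induction m generalizing j with
  | zero =>
    have hr0 : PySem.List.pyRange 0 ((0 : Nat) : Int) 1 = [] := by decide
    simp only [dpA, hr0, List.foldl_nil, dpZero, dpGet, PySem.Dict.getD_insert]
    rw [if_neg (fun h => by have h1 := congrArg Prod.fst h; simp at h1; omega)]
    simp
  | succ m ih =>
    rw [dpA_succ, aRow_frame _ _ _ _ _ _ _ _ _ (by push_cast at hj ⊢; omega)]
    exact ih j (by push_cast at hj ⊢; omega)

theorem dpA_inv (cs : List Char) (full d_max pos bit : Int) (m : Nat) (hm : m ≤ cs.length) :
    Wrow (bGo full d_max pos bit (m : Int) (cs.drop m)) (dpA cs d_max pos bit m) (m : Int) =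
      (bGo full d_max pos bit 0 cs).2.1 := by
  induction m with
  | zero =>
    have h0 : PySem.List.pyRange 0 (0 : Int) 1 = [] := by decide
    simp only [dpA, Nat.cast_zero, h0, List.foldl_nil, List.drop_zero]
    simp [Wrow, dpZero, gidx, dpGet, PySem.Dict.getD_insert, Prod.mk.injEq]
  | succ m ih =>
    have hlt : m < cs.length := by omega
    have ihm := ih (by omega)
    have hdrop : cs.drop m = cs[m] :: cs.drop (m + 1) := List.drop_eq_getElem_cons hlt
    have hcast : ((m + 1 : Nat) : Int) = (m : Int) + 1 := by push_cast; ring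
    rw [hcast, dpA_succ]
    set g := bGo full d_max pos bit ((m : Int) + 1) (cs.drop (m + 1)) with hg
    rw [aRow_W]
    have hz : ∀ u f : Int, dpGet (dpA cs d_max pos bit m) ((m : Int) + 1) u f = 0 := fun u f =>
      dpA_high _ _ _ _ _ _ _ _ (by omega)
    have e1 : Wrow g (dpA cs d_max pos bit m) ((m : Int) + 1) = 0 := by
      simp only [Wrow]; rw [hz 0 0, hz 0 1, hz 1 0, hz 1 1]; ring
    rw [e1]
    have hc : cs.getD ((m : Int)).toNat ' ' = cs[m] := by
      rw [Int.toNat_natCast]; exact List.getD_eq_getElem cs ' ' hlt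
    have hbgo : bGo full d_max pos bit (m : Int) (cs.drop m) =
        ((bCell d_max pos bit (m : Int) cs[m] g 0 0, bCell d_max pos bit (m : Int) cs[m] g 0 1),
         (bCell d_max pos bit (m : Int) cs[m] g 1 0, bCell d_max pos bit (m : Int) cs[m] g 1 1)) := by
      rw [hdrop, hg]; rfl
    rw [← ihm, hbgo]
    simp only [Wrow, gidx, hc]
    norm_num

theorem perD (cs : List Char) (full d_max : Int) (hd : 0 ≤ d_max)
    (hfull : cs.length = 0 ∨ full ≤ 1) :
    (if ((cs.length : Int) - 1 - PySem.Int.floordiv d_max 4) < 0 then (0:Int)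
     else (PySem.List.pyRange 0 (full + 1) 1).foldl
       (fun a i => a + dpGet (dpA cs d_max ((cs.length : Int) - 1 - PySem.Int.floordiv d_max 4)
         ((1 <<< (PySem.Int.mod d_max 4).toNat : Nat) : Int) cs.length) (cs.length : Int) i 1) 0) =
    (if ((cs.length : Int) - 1 - PySem.Int.floordiv d_max 4) < 0 then (0:Int)
     else (bGo full d_max ((cs.length : Int) - 1 - PySem.Int.floordiv d_max 4)
       ((1 <<< (PySem.Int.mod d_max 4).toNat : Nat) : Int) 0 cs).2.1) := by
  by_cases hpos : ((cs.length : Int) - 1 - PySem.Int.floordiv d_max 4) < 0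
  · rw [if_pos hpos, if_pos hpos]
  · rw [if_neg hpos, if_neg hpos]
    have hq : 0 ≤ PySem.Int.floordiv d_max 4 := by
      rw [PySem.Int.floordiv_eq_ediv_of_pos (by norm_num)]
      exact Int.ediv_nonneg hd (by norm_num)
    have hfull' : full ≤ 1 := by rcases hfull with h | h <;> omega
    have inv := dpA_inv cs full d_max ((cs.length : Int) - 1 - PySem.Int.floordiv d_max 4)
      ((1 <<< (PySem.Int.mod d_max 4).toNat : Nat) : Int) cs.length le_rfl
    rw [List.drop_length] at inv
    rw [show bGo full d_max ((cs.length : Int) - 1 - PySem.Int.floordiv d_max 4)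
        ((1 <<< (PySem.Int.mod d_max 4).toNat : Nat) : Int) (cs.length : Int) [] =
        ((0, if full ≥ 0 then 1 else 0), (0, if full ≥ 1 then 1 else 0)) from rfl] at inv
    simp only [Wrow, gidx, reduceIte] at inv
    rw [← inv]
    by_cases hf1 : full = 1
    · subst hf1
      rw [show PySem.List.pyRange 0 (1 + 1) 1 = [0, 1] from by decide]
      simp only [List.foldl_cons, List.foldl_nil]
      norm_num
      try ring
    · by_cases hf0 : full = 0
      · subst hf0
        rw [show PySem.List.pyRange 0 (0 + 1) 1 = [0] from by decide]
        simp only [List.foldl_cons, List.foldl_nil]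
        norm_num
        try ring
      · rw [PySem.List.pyRange_one_eq_nil (by omega)]
        simp only [List.foldl_nil]
        simp [show ¬ (full ≥ 0) from by omega, show ¬ (full ≥ 1) from by omega]

-- ===== VERDICT (by name: the statement is the Claim_ definition above) =====
theorem solve_spec : Claim_equal_solve := by
  intro s full _ hpre
  unfold Spec_solve solve solve_alt
  refine PySem.List.foldl_congr_mem _ _ _ _ ?_
  intro acc d_max hmem
  have hd : 0 ≤ d_max := (PySem.List.mem_pyRange_one.mp hmem).1
  have h := perD s.toList full d_max hd hpre.2
  dsimp only
  by_cases hpos : ((s.toList.length : Int) - 1 - PySem.Int.floordiv d_max 4) < 0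
  · rw [if_pos hpos, if_pos hpos]
  · rw [if_neg hpos] at h
    rw [if_neg hpos] at h
    rw [if_neg hpos, if_neg hpos]
    unfold dpA at h
    rw [h]
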